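-- pv_equiv track=rewrite | github.com/zmaril/checkers | src/checkergame.py | partitions2checkers
-- ===== SOURCE A (Python) =====
-- def partitions2checkers(k, n, part):
--   #First we change to a standard form, i.e. if 'part' is [2,3,4] then
--   #'standard' will be [3,3,3,3,2,2,2,1,1]
--   standard = []
--   for i in range(len(part)-1,-1,-1):
--     standard.extend(part[i]*[i+1])
--   #Now we walk the edge of the partition, appending 'checkers'
--   #wherever there is a downstep
--   checkers = []
--   checkers.append(n-k-standard[0])
--   m = len(standard)
--   for i in range(1, m):
--     checkers.append(standard[i-1] - standard[i] + 1 + checkers[-1])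
--   #end_list accounts for downsteps on empty rows
--   end_list = [n-i for i in range(k-m,0,-1)]
--   checkers.extend(end_list)
--   out_checkers = n*[99]
--   #print out_checkers
--   for i in checkers:
--     out_checkers[i] = i
--     #print out_checkers, i
--   return out_checkers
-- ===== SOURCE B (Python) =====
-- def partitions2checkers(k, n, part):
--   # Scatter checker positions directly while walking the partition rows,
--   # using the closed form position = n - k - rowvalue + t (t = running step count);
--   # no intermediate 'standard'/'checkers' lists are built.
--   out = n * [99]
--   t = 0
--   for i in range(len(part), 0, -1):
--     for _ in range(part[i - 1]):
--       c = n - k - i + t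
--       out[c] = c
--       t += 1
--   for j in range(t, k):
--     out[n - k + j] = n - k + j
--   return out
-- ===== Notes on version B (the rewrite author's own statement) =====
-- stated objective: simpler
-- what changed: A builds three intermediate lists (a 'standard' expansion, a prefix-sum 'checkers' accumulator, an 'end_list') and then scatters; B fuses everything into one pass that scatters each checker position directly using the closed form position = n - k - rowvalue + step, building no intermediate lists.
-- crash fix: When the expanded partition 'standard' is empty (part empty or all entries <= 0) A raises IndexError on standard[0]; B simply scatters the k empty-row positions (or returns the untouched board), e.g. returning [99,99,99] for (0,3,[]). — e.g. on partitions2checkers(0, 3, []): A raises IndexError, B returns [99, 99, 99]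
import Mathlib
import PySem

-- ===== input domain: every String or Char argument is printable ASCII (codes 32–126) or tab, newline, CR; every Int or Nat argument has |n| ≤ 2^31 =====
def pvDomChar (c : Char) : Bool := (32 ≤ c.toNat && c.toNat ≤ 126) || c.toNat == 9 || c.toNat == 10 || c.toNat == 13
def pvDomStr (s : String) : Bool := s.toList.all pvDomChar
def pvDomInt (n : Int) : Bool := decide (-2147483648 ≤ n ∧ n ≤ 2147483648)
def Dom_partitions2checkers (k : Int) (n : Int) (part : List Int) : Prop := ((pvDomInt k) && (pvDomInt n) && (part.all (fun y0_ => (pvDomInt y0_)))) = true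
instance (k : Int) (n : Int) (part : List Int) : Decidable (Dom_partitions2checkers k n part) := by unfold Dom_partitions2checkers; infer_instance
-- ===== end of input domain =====

-- B replaces A's three intermediate lists (standard expansion, prefix-sum accumulator, end_list)
-- by one fused scatter pass using the closed form position = n - k - rowvalue + step.

-- ===== PORT A =====
def partitions2checkers (k : Int) (n : Int) (part : List Int) : List Int :=
  -- standard = []; for i in range(len(part)-1,-1,-1): standard.extend(part[i]*[i+1])
  let standard : List Int :=
    (PySem.List.pyRange ((part.length : Int) - 1) (-1) (-1)).foldl
      (fun acc i => acc ++ List.replicate (PySem.List.pyGetD part i 0).toNat (i + 1)) []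
  -- checkers = [n-k-standard[0]]  (standard[0]: IndexError on empty standard — excluded by Pre_)
  let checkers0 : List Int := [n - k - PySem.List.pyGetD standard 0 0]
  let m : Int := (standard.length : Int)
  -- for i in range(1, m): checkers.append(standard[i-1] - standard[i] + 1 + checkers[-1])
  let checkers : List Int :=
    (PySem.List.pyRange 1 m 1).foldl
      (fun c i => c ++ [PySem.List.pyGetD standard (i - 1) 0 - PySem.List.pyGetD standard i 0
                          + 1 + PySem.List.pyGetD c (-1) 0]) checkers0
  -- end_list = [n-i for i in range(k-m,0,-1)]
  let endList : List Int := (PySem.List.pyRange (k - m) 0 (-1)).map (fun i => n - i)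
  -- out_checkers = n*[99]; for i in checkers: out_checkers[i] = i  (IndexError outside Pre_)
  (checkers ++ endList).foldl (fun out i => PySem.List.pySetD out i i)
    (List.replicate n.toNat (99 : Int))

-- ===== PORT B =====
def partitions2checkers_alt (k : Int) (n : Int) (part : List Int) : List Int :=
  -- out = n*[99]; t = 0
  -- for i in range(len(part), 0, -1): for _ in range(part[i-1]): c = n-k-i+t; out[c] = c; t += 1
  let st : List Int × Int :=
    (PySem.List.pyRange (part.length : Int) 0 (-1)).foldl
      (fun (st : List Int × Int) i =>
        (List.replicate (PySem.List.pyGetD part (i - 1) 0).toNat ()).foldl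
          (fun (st : List Int × Int) _ =>
            (PySem.List.pySetD st.1 (n - k - i + st.2) (n - k - i + st.2), st.2 + 1)) st)
      (List.replicate n.toNat (99 : Int), 0)
  -- for j in range(t, k): out[n-k+j] = n-k+j
  (PySem.List.pyRange st.2 k 1).foldl
    (fun out j => PySem.List.pySetD out (n - k + j) (n - k + j)) st.1

-- ===== PRECONDITION & SPEC =====
-- |standard| = sum of the positive partition entries, computed without expanding
def pvM (part : List Int) : Nat := part.foldl (fun s v => s + v.toNat) 0
-- the first scattered row value (largest 1-based index with a positive entry)
def pvVFirst (part : List Int) : Int :=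
  (PySem.List.enumerate part 0).foldl (fun acc jv => if 0 < jv.2 then jv.1 + 1 else acc) 0
-- the last scattered row value (smallest 1-based index with a positive entry)
def pvVLast (part : List Int) : Int :=
  (PySem.List.enumerate part 0).foldl
    (fun acc jv => if acc = 0 ∧ 0 < jv.2 then jv.1 + 1 else acc) 0

-- Pre_ = exactly the inputs where Python A returns: the expanded partition is nonempty
-- (else 'standard[0]' raises IndexError) and every scattered position is a valid index of
-- the length-n board (else 'out_checkers[i] = i' raises IndexError). The scattered
-- positions are strictly increasing, so only the two endpoints of each of the two scatter
-- phases need checking — stated arithmetically so deciding Pre_ is cheap on any input.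
def Pre_partitions2checkers (k : Int) (n : Int) (part : List Int) : Prop :=
  0 < pvM part ∧
  (-(n.toNat : Int) ≤ n - k - pvVFirst part ∧
    n - k - pvVLast part + ((pvM part : Int) - 1) < (n.toNat : Int)) ∧
  (k ≤ (pvM part : Int) ∨
    (-(n.toNat : Int) ≤ n - k + (pvM part : Int) ∧ n - 1 < (n.toNat : Int)))
instance (k : Int) (n : Int) (part : List Int) : Decidable (Pre_partitions2checkers k n part) := by
  unfold Pre_partitions2checkers; infer_instance

def pvWitness_partitions2checkers : Int × Int × List Int := (2, 5, [1, 2])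

-- A raises IndexError on standard[0] when the expanded partition is empty; B just scatters
-- the k empty-row positions (returning the untouched board when k ≤ 0).
def Raises_partitions2checkers (k : Int) (n : Int) (part : List Int) : Prop :=
  pvM part = 0 ∧ (k ≤ 0 ∨ (-(n.toNat : Int) ≤ n - k ∧ n - 1 < (n.toNat : Int)))
instance (k : Int) (n : Int) (part : List Int) : Decidable (Raises_partitions2checkers k n part) := by
  unfold Raises_partitions2checkers; infer_instance
def pvRaiseWitness_partitions2checkers : Int × Int × List Int := (0, 3, [])
def pvRaiseWitnessOut_partitions2checkers : List Int := [99, 99, 99]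

def Spec_partitions2checkers (k : Int) (n : Int) (part : List Int) (out : List Int) : Prop := out = partitions2checkers_alt k n part
instance (k : Int) (n : Int) (part : List Int) (out : List Int) : Decidable (Spec_partitions2checkers k n part out) := by unfold Spec_partitions2checkers; infer_instance

-- ===== CLAIM (what is proved, stated in full; the proofs are below) =====
def Claim_equal_partitions2checkers : Prop := ∀ (k : Int) (n : Int) (part : List Int), Dom_partitions2checkers k n part → Pre_partitions2checkers k n part → Spec_partitions2checkers k n part (partitions2checkers k n part)
def Claim_raises_partitions2checkers : Prop := (∀ (k : Int) (n : Int) (part : List Int), Dom_partitions2checkers k n part → Raises_partitions2checkers k n part → ¬ Pre_partitions2checkers k n part) ∧ (Dom_partitions2checkers (pvRaiseWitness_partitions2checkers.1) (pvRaiseWitness_partitions2checkers.2.1) (pvRaiseWitness_partitions2checkers.2.2) ∧ Raises_partitions2checkers (pvRaiseWitness_partitions2checkers.1) (pvRaiseWitness_partitions2checkers.2.1) (pvRaiseWitness_partitions2checkers.2.2) ∧ partitions2checkers_alt (pvRaiseWitness_partitions2checkers.1) (pvRaiseWitness_partitions2checkers.2.1) (pvRaiseWitness_partitions2checkers.2.2)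 = pvRaiseWitnessOut_partitions2checkers)

-- ===== LEMMAS AND PROOFS =====

-- the expanded partition ('standard' in A), written directly as a flatMap
def pvStd (part : List Int) : List Int :=
  (PySem.List.pyRange (part.length : Int) 0 (-1)).flatMap
    (fun i => List.replicate (PySem.List.pyGetD part (i - 1) 0).toNat i)

-- the checker positions scattered by both programs: n - k - value + step
def pvScatter (k n : Int) : List Int → Int → List Int
  | [], _ => []
  | v :: vs, t => (n - k - v + t) :: pvScatter k n vs (t + 1)

-- A's standard-building loop computes pvStd
lemma stdA_eq (part : List Int) :
    (PySem.List.pyRange ((part.length : Int) - 1) (-1) (-1)).foldl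
      (fun acc i => acc ++ List.replicate (PySem.List.pyGetD part i 0).toNat (i + 1)) []
    = pvStd part := by
  rw [PySem.List.foldl_append_eq_flatMap, List.nil_append]
  unfold pvStd
  rw [PySem.List.pyRange_neg_one, PySem.List.pyRange_neg_one]
  have h1 : ((part.length : Int) - 1 - (-1)).toNat = part.length := by omega
  have h2 : ((part.length : Int) - 0).toNat = part.length := by omega
  rw [h1, h2, List.flatMap_map, List.flatMap_map]
  apply List.flatMap_congr
  intro x hx
  have e1 : (part.length : Int) - 1 - (x : Int) + 1 = (part.length : Int) - (x : Int) := by ring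
  have e2 : (part.length : Int) - (x : Int) - 1 = (part.length : Int) - 1 - (x : Int) := by ring
  rw [e1, e2]

-- A's prefix-sum loop, characterised
lemma chkA (k n : Int) (s : List Int) :
    ∀ (d a : Nat) (c : List Int), s.length - a = d → 1 ≤ a → a ≤ s.length →
      PySem.List.pyGetD c (-1) 0 = n - k - PySem.List.pyGetD s ((a : Int) - 1) 0 + ((a : Int) - 1) →
      (PySem.List.pyRange (a : Int) (s.length : Int) 1).foldl
        (fun c i => c ++ [PySem.List.pyGetD s (i - 1) 0 - PySem.List.pyGetD s i 0
                            + 1 + PySem.List.pyGetD c (-1) 0]) c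
      = c ++ pvScatter k n (s.drop a) (a : Int) := by
  intro d
  induction d with
  | zero =>
    intro a c hd _ ha2 _
    have haeq : a = s.length := by omega
    subst haeq
    rw [PySem.List.pyRange_one_eq_nil (by omega), List.drop_length]
    simp [pvScatter]
  | succ d ih =>
    intro a c hd ha1 ha2 hlast
    have hlt : a < s.length := by omega
    rw [PySem.List.pyRange_one_cons (by exact_mod_cast hlt), List.foldl_cons]
    have hget : PySem.List.pyGetD s (a : Int) 0 = s[a] := by
      rw [PySem.List.pyGetD_natCast]; exact List.getD_eq_getElem s 0 hlt
    have hstep : c ++ [PySem.List.pyGetD s ((a : Int) - 1) 0 - PySem.List.pyGetD s (a : Int) 0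
        + 1 + PySem.List.pyGetD c (-1) 0] = c ++ [n - k - s[a] + (a : Int)] := by
      rw [hlast, hget]; ring_nf
    rw [hstep]
    have hcast : ((a : Int) + 1) = (((a + 1 : Nat)) : Int) := by push_cast; ring
    rw [hcast]
    rw [ih (a + 1) (c ++ [n - k - s[a] + (a : Int)]) (by omega) (by omega) (by omega)
      (by
        rw [PySem.List.pyGetD_neg_one_append_singleton]
        have : ((a + 1 : Nat) : Int) - 1 = (a : Int) := by push_cast; ring
        rw [this, hget])]
    rw [List.drop_eq_getElem_cons hlt]
    simp [pvScatter, List.append_assoc]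

-- A's checkers list equals pvScatter over the standard
lemma checkersA_eq (k n : Int) (s : List Int) (hs : s ≠ []) :
    (PySem.List.pyRange 1 (s.length : Int) 1).foldl
      (fun c i => c ++ [PySem.List.pyGetD s (i - 1) 0 - PySem.List.pyGetD s i 0
                          + 1 + PySem.List.pyGetD c (-1) 0])
      [n - k - PySem.List.pyGetD s 0 0]
    = pvScatter k n s 0 := by
  obtain ⟨v, vs, rfl⟩ := List.exists_cons_of_ne_nil hs
  have h1 : ((1 : Nat) : Int) = (1 : Int) := by norm_num
  have := chkA k n (v :: vs) ((v :: vs).length - 1) 1 [n - k - PySem.List.pyGetD (v :: vs) 0 0]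
    (by omega) (by omega) (by simp)
    (by
      have : PySem.List.pyGetD [n - k - PySem.List.pyGetD (v :: vs) 0 0] (-1) 0
          = n - k - PySem.List.pyGetD (v :: vs) 0 0 := by
        simpa using PySem.List.pyGetD_neg_one_append_singleton ([] : List Int)
          (n - k - PySem.List.pyGetD (v :: vs) 0 0) 0
      rw [this]; norm_num)
  rw [h1] at this
  rw [this]
  simp [pvScatter, PySem.List.pyGetD_zero_cons]

-- A's end_list in forward form
lemma endListA_eq (k n m : Int) :
    (PySem.List.pyRange (k - m) 0 (-1)).map (fun i => n - i)
    = (PySem.List.pyRange m k 1).map (fun j => n - k + j) := by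
  rw [PySem.List.pyRange_neg_one, PySem.List.pyRange_one, List.map_map, List.map_map]
  have h : (k - m - 0).toNat = (k - m).toNat := by omega
  rw [h]
  apply List.map_congr_left
  intro x hx
  simp only [Function.comp_apply]
  ring

-- folding over a unit replicate = folding over a value replicate
lemma foldl_replicate_unit {α : Type} (G : α → Int → α) (cnt : Nat) (i : Int) (st : α) :
    (List.replicate cnt ()).foldl (fun st _ => G st i) st
    = (List.replicate cnt i).foldl G st := by
  induction cnt generalizing st with
  | zero => rfl
  | succ c ih => simp only [List.replicate_succ, List.foldl_cons, ih]

-- a fold of row-folds is a fold over the flattened rows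
lemma foldl_rows {α : Type} (step : α → Int → α) (rows : Int → List Int) :
    ∀ (is : List Int) (st : α),
      is.foldl (fun st i => (rows i).foldl step st) st = (is.flatMap rows).foldl step st := by
  intro is
  induction is with
  | nil => intro st; rfl
  | cons i is ih => intro st; simp [List.flatMap_cons, List.foldl_append, ih]

-- B's fused loop in terms of pvScatter
lemma loopB (k n : Int) :
    ∀ (vs out : List Int) (t : Int),
      vs.foldl (fun (st : List Int × Int) v =>
          (PySem.List.pySetD st.1 (n - k - v + st.2) (n - k - v + st.2), st.2 + 1)) (out, t)
      = ((pvScatter k n vs t).foldl (fun o c => PySem.List.pySetD o c c) out, t + vs.length) := by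
  intro vs
  induction vs with
  | nil => intro out t; simp [pvScatter]
  | cons v vs ih => intro out t; simp [pvScatter, ih]; ring_nf

-- ===== VERDICT (by name: the statement is the Claim_ definition above) =====
-- |pvStd part| is the sum of the positive entries of part
lemma pvM_append (part : List Int) (v : Int) : pvM (part ++ [v]) = pvM part + v.toNat := by
  unfold pvM; rw [List.foldl_append]; rfl

lemma pvStd_length (part : List Int) : (pvStd part).length = pvM part := by
  induction part using List.reverseRecOn with
  | nil => rfl
  | append_singleton part v ih =>
    rw [pvM_append, ← ih]
    unfold pvStd
    rw [List.length_append]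
    have hL : ((part.length + [v].length : Nat) : Int) = (part.length : Int) + 1 := by
      simp
    rw [hL, PySem.List.pyRange_neg_one_cons (by positivity), List.flatMap_cons]
    have hv : PySem.List.pyGetD (part ++ [v]) ((part.length : Int) + 1 - 1) 0 = v := by
      have : (part.length : Int) + 1 - 1 = ((part.length : Nat) : Int) := by ring
      rw [this, PySem.List.pyGetD_natCast]
      simp
    have hrest : (PySem.List.pyRange ((part.length : Int) + 1 - 1) 0 (-1)).flatMap
        (fun i => List.replicate (PySem.List.pyGetD (part ++ [v]) (i - 1) 0).toNat i)
        = pvStd part := by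
      have he : (part.length : Int) + 1 - 1 = (part.length : Int) := by ring
      rw [he]
      unfold pvStd
      apply List.flatMap_congr
      intro i hi
      have hmem := (PySem.List.mem_pyRange_neg_one).mp hi
      have hj : ∃ j : Nat, (i - 1 : Int) = (j : Int) ∧ j < part.length := by
        refine ⟨(i - 1).toNat, by omega, by omega⟩
      obtain ⟨j, hj1, hj2⟩ := hj
      rw [hj1, PySem.List.pyGetD_natCast, PySem.List.pyGetD_natCast]
      unfold List.getD
      rw [List.getElem?_append_left hj2]
    have hfold : (PySem.List.pyRange ((part.length : Int)) 0 (-1)).flatMap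
        (fun i => List.replicate (PySem.List.pyGetD part (i - 1) 0).toNat i) = pvStd part := rfl
    rw [hrest, hfold, hv, List.length_append, List.length_replicate]
    omega

lemma pvStd_ne_nil (part : List Int) (h : 0 < pvM part) : pvStd part ≠ [] := by
  intro hnil
  have := pvStd_length part
  rw [hnil] at this
  simp at this
  omega

-- B's inner unit-replicate loop as a fold over a value replicate
lemma innerB (k n : Int) (cnt : Nat) (i : Int) (st : List Int × Int) :
    (List.replicate cnt ()).foldl
      (fun (st : List Int × Int) _ =>
        (PySem.List.pySetD st.1 (n - k - i + st.2) (n - k - i + st.2), st.2 + 1)) st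
    = (List.replicate cnt i).foldl
      (fun (st : List Int × Int) v =>
        (PySem.List.pySetD st.1 (n - k - v + st.2) (n - k - v + st.2), st.2 + 1)) st :=
  foldl_replicate_unit
    (fun st v => (PySem.List.pySetD st.1 (n - k - v + st.2) (n - k - v + st.2), st.2 + 1)) cnt i st

theorem partitions2checkers_spec : Claim_equal_partitions2checkers := by
  intro k n part _ hpre
  unfold Spec_partitions2checkers partitions2checkers partitions2checkers_alt
  simp only [stdA_eq, innerB]
  rw [checkersA_eq k n (pvStd part) (pvStd_ne_nil part hpre.1)]
  rw [endListA_eq k n ((pvStd part).length : Int)]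
  rw [foldl_rows (fun (st : List Int × Int) v =>
        (PySem.List.pySetD st.1 (n - k - v + st.2) (n - k - v + st.2), st.2 + 1))
      (fun i => List.replicate (PySem.List.pyGetD part (i - 1) 0).toNat i)]
  have hflat : (PySem.List.pyRange (part.length : Int) 0 (-1)).flatMap
      (fun i => List.replicate (PySem.List.pyGetD part (i - 1) 0).toNat i) = pvStd part := rfl
  rw [hflat, loopB]
  simp only [zero_add]
  rw [List.foldl_append, List.foldl_map]

@[simp] theorem partitions2checkers_raises : Claim_raises_partitions2checkers := by
  unfold Claim_raises_partitions2checkers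
  constructor
  · intro k n part _ hr hp; have h1 := hr.1; have h2 := hp.1; omega
  · exact ⟨by decide, by decide, by decide⟩
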